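-- pv_equiv track=rewrite | github.com/HassenBasdouri/CorrecteurOrthographeFR | correcteur.py | DistanceMot
-- ===== SOURCE A (Python) =====
-- def DistanceMot(mot1, mot2):
--     """retourne la distance entre deux mots."""
--     distance=0
--     #mettre les chaines dans des listes
--     l1=[ch for ch in mot1]
--     l2=[ch for ch in mot2]
--     #avoir deux liste de la meme taille
--     max_length=max(len(l2),len(l1))
--     l1+=[""]*(max_length-len(l1))
--     l2+=[""]*(max_length-len(l2))
--
--     for j, i in zip (l1,l2) :
--             if i!=j:
--                 distance=distance+1
--     return distance
-- ===== SOURCE B (Python) =====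
-- def DistanceMot(mot1, mot2):
--     """retourne la distance entre deux mots."""
--     matches = 0
--     for i in range(min(len(mot1), len(mot2))):
--         if mot1[i] == mot2[i]:
--             matches += 1
--     return max(len(mot1), len(mot2)) - matches
-- ===== Notes on version B (the rewrite author's own statement) =====
-- stated objective: simpler
-- what changed: B counts the complement: an index loop over the overlapping prefix counts MATCHING positions, and the result is max(len1,len2) minus that count, instead of A's building two equal-length padded single-character-string lists and counting mismatches over their zip.
import Mathlib
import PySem

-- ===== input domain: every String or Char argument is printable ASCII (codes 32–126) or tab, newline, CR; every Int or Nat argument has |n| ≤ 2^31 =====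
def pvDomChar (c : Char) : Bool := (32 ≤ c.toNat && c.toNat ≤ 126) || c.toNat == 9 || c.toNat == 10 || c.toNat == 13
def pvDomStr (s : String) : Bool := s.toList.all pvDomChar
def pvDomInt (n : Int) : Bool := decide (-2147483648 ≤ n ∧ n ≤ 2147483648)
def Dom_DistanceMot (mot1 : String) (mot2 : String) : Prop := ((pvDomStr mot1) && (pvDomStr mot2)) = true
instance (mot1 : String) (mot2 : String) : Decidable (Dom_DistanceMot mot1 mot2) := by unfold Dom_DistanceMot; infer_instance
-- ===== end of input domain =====

-- B counts the complement — matching positions over the overlapping prefix by index, subtracted from the max length — instead of A's padding-and-mismatch scan (simpler).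

-- ===== PORT A =====
-- A pads both lists of single-character strings with "" to the max length, then counts unequal pairs.
def DistanceMot (mot1 : String) (mot2 : String) : Int :=
  let l1 : List String := mot1.toList.map (fun ch => String.ofList [ch])
  let l2 : List String := mot2.toList.map (fun ch => String.ofList [ch])
  let maxLength := max l2.length l1.length
  let l1' := l1 ++ List.replicate (maxLength - l1.length) ""
  let l2' := l2 ++ List.replicate (maxLength - l2.length) ""
  (l1'.zip l2').foldl (fun distance p => if p.2 ≠ p.1 then distance + 1 else distance) 0

-- ===== PORT B =====
-- index loop over range(min(len,len)) counting matching positions; result = max length - mcount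
def DistanceMot_alt (mot1 : String) (mot2 : String) : Int :=
  let l1 := mot1.toList
  let l2 := mot2.toList
  let mcount := (List.range (min l1.length l2.length)).foldl
    (fun m i => if l1.getD i ' ' == l2.getD i ' ' then m + 1 else m) (0 : Int)
  (max l1.length l2.length : Int) - mcount

-- ===== PRECONDITION & SPEC =====
def Spec_DistanceMot (mot1 : String) (mot2 : String) (out : Int) : Prop := out = DistanceMot_alt mot1 mot2
instance (mot1 : String) (mot2 : String) (out : Int) : Decidable (Spec_DistanceMot mot1 mot2 out) := by unfold Spec_DistanceMot; infer_instance

-- ===== CLAIM (what is proved, stated in full; the proofs are below) =====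
def Claim_equal_DistanceMot : Prop := ∀ (mot1 : String) (mot2 : String), Dom_DistanceMot mot1 mot2 → Spec_DistanceMot mot1 mot2 (DistanceMot mot1 mot2)

-- ===== LEMMAS AND PROOFS =====

theorem pv_foldl_count (l : List (String × String)) (d : Int) :
    l.foldl (fun distance p => if p.2 ≠ p.1 then distance + 1 else distance) d
      = d + (l.countP (fun p => p.2 ≠ p.1) : Int) := by
  induction l generalizing d with
  | nil => simp
  | cons h t ih =>
    simp only [List.foldl_cons, List.countP_cons, ih]
    by_cases hc : h.2 = h.1
    · simp [hc]
    · simp [hc]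
      ring

theorem pv_single_ne_empty (c : Char) : String.ofList [c] ≠ "" := by
  intro h; have := congrArg String.length h; simp at this

theorem pv_single_inj (c c' : Char) : (String.ofList [c] = String.ofList [c']) ↔ c = c' := by
  rw [String.ofList_inj]; simp

-- all-padding tails: zipping real characters against "" padding counts every position
theorem pv_pad_left (l : List Char) :
    (((List.replicate l.length "").zip (l.map (fun ch => String.ofList [ch]))).countP
      (fun p : String × String => p.2 ≠ p.1) : Int) = (l.length : Int) := by
  induction l with
  | nil => simp
  | cons c t ih =>
    simp only [List.map_cons, List.length_cons, List.replicate_succ, List.zip_cons_cons,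
      List.countP_cons]
    simp only [ne_eq, decide_not] at ih ⊢
    simp [pv_single_ne_empty c]
    omega

theorem pv_pad_right (l : List Char) :
    (((l.map (fun ch => String.ofList [ch])).zip (List.replicate l.length "")).countP
      (fun p : String × String => p.2 ≠ p.1) : Int) = (l.length : Int) := by
  induction l with
  | nil => simp
  | cons c t ih =>
    simp only [List.map_cons, List.length_cons, List.replicate_succ, List.zip_cons_cons,
      List.countP_cons]
    simp only [ne_eq, decide_not] at ih ⊢
    have hne : ¬ ("" : String) = String.ofList [c] := fun h => pv_single_ne_empty c h.symm
    simp [hne]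
    omega

-- A's padded mismatch count = truncating-zip mismatch count + length difference.
theorem pv_main (l1 l2 : List Char) :
    ((((l1.map (fun ch => String.ofList [ch])) ++ List.replicate (max l2.length l1.length - l1.length) "").zip
      ((l2.map (fun ch => String.ofList [ch])) ++ List.replicate (max l2.length l1.length - l2.length) "")).countP
        (fun p => p.2 ≠ p.1) : Int)
      = ((l1.zip l2).countP (fun p => p.1 ≠ p.2) : Int)
        + |(l1.length : Int) - (l2.length : Int)| := by
  induction l1 generalizing l2 with
  | nil =>
    simpa using pv_pad_left l2
  | cons c t ih =>
    cases l2 with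
    | nil =>
      simpa using pv_pad_right (c :: t)
    | cons c' t' =>
      have hmax : max (c' :: t').length (c :: t).length - (c :: t).length
          = max t'.length t.length - t.length := by
        simp only [List.length_cons]; omega
      have hmax2 : max (c' :: t').length (c :: t).length - (c' :: t').length
          = max t'.length t.length - t'.length := by
        simp only [List.length_cons]; omega
      rw [hmax, hmax2]
      simp only [List.map_cons, List.cons_append, List.zip_cons_cons, List.countP_cons,
        List.length_cons]
      have ih' := ih t'
      simp only [ne_eq, decide_not] at ih' ⊢
      by_cases hc : c = c'
      · subst hc
        simp
        exact ih'
      · have hc' : ¬ String.ofList [c'] = String.ofList [c] := by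
          rw [pv_single_inj]; exact fun h => hc h.symm
        simp [hc, hc']
        rw [ih']
        omega

-- B's index-counted matches over range(min) = equality count over the truncating zip.
theorem pv_matches (l1 l2 : List Char) :
    ((List.range (min l1.length l2.length)).countP
        (fun i => l1.getD i ' ' == l2.getD i ' ') : Int)
      = ((l1.zip l2).countP (fun p => p.1 == p.2) : Int) := by
  induction l1 generalizing l2 with
  | nil => simp
  | cons c t ih =>
    cases l2 with
    | nil => simp
    | cons c' t' =>
      have hmin : min (c :: t).length (c' :: t').length = min t.length t'.length + 1 := by
        simp only [List.length_cons]; omega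
      rw [hmin, List.range_succ_eq_map]
      simp only [List.countP_cons, List.countP_map, List.zip_cons_cons]
      have ih' := ih t'
      simp only [Function.comp_def] at ih' ⊢
      simp only [List.getD_cons_succ, List.getD_cons_zero]
      simp only [List.getD_eq_getElem?_getD] at ih' ⊢
      by_cases hc : c = c'
      · simp [hc]
        omega
      · simp [hc]
        omega
  
-- ===== VERDICT (by name: the statement is the Claim_ definition above) =====
theorem DistanceMot_spec : Claim_equal_DistanceMot := by
  intro mot1 mot2 _
  unfold Spec_DistanceMot DistanceMot DistanceMot_alt
  simp only [List.length_map]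
  rw [pv_foldl_count, PySem.List.foldl_count_if]
  rw [pv_matches]
  have hmain := pv_main mot1.toList mot2.toList
  have hsplit : ((mot1.toList.zip mot2.toList).countP (fun p => !decide (p.1 = p.2)))
      + ((mot1.toList.zip mot2.toList).countP (fun p => p.1 == p.2))
      = min mot1.toList.length mot2.toList.length := by
    have hlen := List.length_eq_countP_add_countP (fun p : Char × Char => p.1 == p.2)
      (l := mot1.toList.zip mot2.toList)
    simp only [List.length_zip] at hlen
    have hpred : (fun p : Char × Char => decide ¬(p.1 == p.2) = true)
        = (fun p : Char × Char => !decide (p.1 = p.2)) := by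
      funext p; simp
    rw [hpred] at hlen
    omega
  simp only [ne_eq, decide_not] at hmain ⊢
  rw [hmain]
  have habs : |(mot1.toList.length : Int) - (mot2.toList.length : Int)|
      = (max mot1.toList.length mot2.toList.length : Int)
        - (min mot1.toList.length mot2.toList.length : Int) := by
    rcases abs_cases ((mot1.toList.length : Int) - (mot2.toList.length : Int)) with ⟨h, _⟩ | ⟨h, _⟩ <;>
      (rw [h]; omega)
  rw [habs]
  omega
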